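-- pv_equiv track=rewrite | github.com/lukasdean/robust_python | std_module/code_fragment.py | fill_none_iterable
-- ===== SOURCE A (Python) =====
-- def fill_none_iterable(none_iterable):
--     """
--     专门用于填充包含None值的可迭代对象，逻辑为将None值填充为上一个不为None的对象
--     @日期: 过去的某个时刻
--     @作者: 徐嘉辉
--     Args:
--         none_iterable: 包含None值的可迭代对象
--
--     Returns:
--         返回填充完毕的元组
--     """
--
--     tmp = None
--     back_tuple = ()
--     for element in none_iterable:
--
--         if element is not None:
--             tmp = element
--
--         back_tuple = back_tuple + (tmp,)
--
--     return back_tuple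
-- ===== SOURCE B (Python) =====
-- def fill_none_iterable(none_iterable):
--     xs = tuple(none_iterable)
--
--     def last_value(prefix):
--         for v in reversed(prefix):
--             if v is not None:
--                 return v
--         return None
--
--     return tuple(last_value(xs[:i + 1]) for i in range(len(xs)))
-- ===== Notes on version B (the rewrite author's own statement) =====
-- stated objective: alternative
-- what changed: A's single stateful pass carrying the last non-None value in a mutable tmp is replaced by a stateless per-index formulation: each output position independently looks up the last non-None element in its prefix by a backward scan.
import Mathlib
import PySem

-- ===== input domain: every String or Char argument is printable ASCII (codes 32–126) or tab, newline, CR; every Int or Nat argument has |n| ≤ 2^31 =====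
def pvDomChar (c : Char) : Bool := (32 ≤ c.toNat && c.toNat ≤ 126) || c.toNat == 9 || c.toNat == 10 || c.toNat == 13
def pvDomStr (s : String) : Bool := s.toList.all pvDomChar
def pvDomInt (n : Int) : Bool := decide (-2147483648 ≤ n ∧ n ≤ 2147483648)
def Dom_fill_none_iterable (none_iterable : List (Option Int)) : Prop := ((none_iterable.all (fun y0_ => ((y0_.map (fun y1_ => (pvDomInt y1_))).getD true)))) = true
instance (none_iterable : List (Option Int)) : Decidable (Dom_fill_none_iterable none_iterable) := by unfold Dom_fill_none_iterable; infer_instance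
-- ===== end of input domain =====

-- B replaces A's stateful carry loop by a stateless per-index backward prefix
-- scan ("alternative" decomposition, same return value, no speed claim).

-- ===== PORT A =====
-- A: tmp = None; for element: if element is not None: tmp = element; back += (tmp,)
def fill_none_iterable (none_iterable : List (Option Int)) : List (Option Int) :=
  (none_iterable.foldl
    (fun (st : Option Int × List (Option Int)) element =>
      let tmp := if element.isSome then element else st.1
      (tmp, st.2 ++ [tmp]))
    (none, [])).2

-- ===== PORT B =====
-- last_value(prefix): for v in reversed(prefix): if v is not None: return v; return None
def lastValueLoop : List (Option Int) → Option Int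
  | [] => none
  | v :: vs => if v.isSome then v else lastValueLoop vs

def lastValue (pfx : List (Option Int)) : Option Int :=
  lastValueLoop pfx.reverse

-- tuple(last_value(xs[:i+1]) for i in range(len(xs)))
def fill_none_iterable_alt (none_iterable : List (Option Int)) : List (Option Int) :=
  (List.range none_iterable.length).map
    (fun i => lastValue (none_iterable.take (i + 1)))

-- ===== PRECONDITION & SPEC =====
def Spec_fill_none_iterable (none_iterable : List (Option Int)) (out : List (Option Int)) : Prop := out = fill_none_iterable_alt none_iterable
instance (none_iterable : List (Option Int)) (out : List (Option Int)) : Decidable (Spec_fill_none_iterable none_iterable out) := by unfold Spec_fill_none_iterable; infer_instance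

-- ===== CLAIM (what is proved, stated in full; the proofs are below) =====
def Claim_equal_fill_none_iterable : Prop := ∀ (none_iterable : List (Option Int)), Dom_fill_none_iterable none_iterable → Spec_fill_none_iterable none_iterable (fill_none_iterable none_iterable)

-- ===== LEMMAS AND PROOFS =====

-- abstract emission of A's loop (the carried values, without the accumulator list)
def fillEmit : Option Int → List (Option Int) → List (Option Int)
  | _, [] => []
  | tmp, e :: es =>
    let t := if e.isSome then e else tmp
    t :: fillEmit t es

theorem foldl_eq_fillEmit (xs : List (Option Int)) (tmp : Option Int)
    (acc : List (Option Int)) :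
    (xs.foldl
      (fun (st : Option Int × List (Option Int)) element =>
        let t := if element.isSome then element else st.1
        (t, st.2 ++ [t]))
      (tmp, acc)).2 = acc ++ fillEmit tmp xs := by
  induction xs generalizing tmp acc with
  | nil => simp [fillEmit]
  | cons e es ih => simp [List.foldl, fillEmit, ih]

-- key invariant: forward fill from carry `lastValueLoop pre` = backward prefix scan with `pre` appended
theorem fillEmit_eq_scan (xs pre : List (Option Int)) :
    fillEmit (lastValueLoop pre) xs =
      (List.range xs.length).map
        (fun i => lastValueLoop ((xs.take (i + 1)).reverse ++ pre)) := by
  induction xs generalizing pre with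
  | nil => simp [fillEmit]
  | cons e es ih =>
    have hcarry : (if e.isSome then e else lastValueLoop pre)
        = lastValueLoop (e :: pre) := by
      cases e <;> simp [lastValueLoop]
    simp only [fillEmit, List.length_cons, List.range_succ_eq_map, List.map_cons,
      List.map_map]
    rw [hcarry, ih (e :: pre)]
    simp [Function.comp_def]

-- ===== VERDICT (by name: the statement is the Claim_ definition above) =====
theorem fill_none_iterable_spec : Claim_equal_fill_none_iterable := by
  intro xs _
  unfold Spec_fill_none_iterable fill_none_iterable fill_none_iterable_alt
  rw [foldl_eq_fillEmit]
  have h0 : (none : Option Int) = lastValueLoop [] := rfl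
  rw [List.nil_append, h0, fillEmit_eq_scan]
  unfold lastValue
  simp
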